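-- pv_equiv track=rewrite | github.com/ika9810/Atcoder | Contests/AtCoder Beginner Contest 296/D_GPT.py | smallest_integer
-- ===== SOURCE A (Python) =====
-- def check(X, N, M):
--     count = 0
--     for i in range(1, N + 1):
--         count += min(X // i, N)
--     return count >= M * 2
--
-- def smallest_integer(N, M):
--     left = 1
--     right = N * N + 1
--
--     while left < right:
--         mid = (left + right) // 2
--         if check(mid, N, M):
--             right = mid
--         else:
--             left = mid + 1
--
--     if left == N * N + 1:
--         return -1
--     else:
--         return left
-- ===== SOURCE B (Python) =====
-- def smallest_integer(N, M):
--     need = 2 * M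
--
--     def count(X):
--         # number of pairs (i, j) with 1 <= i, j <= N and i * j <= X,
--         # summed in O(sqrt(X)) quotient blocks instead of one term per i
--         total = 0
--         i = 1
--         while i <= N:
--             q = X // i
--             if q == 0:
--                 break
--             if q >= N:
--                 # every k in [i, X // N] has X // k >= N: each contributes N
--                 j = min(X // N, N)
--                 total += N * (j - i + 1)
--             else:
--                 j = min(X // q, N)
--                 total += q * (j - i + 1)
--             i = j + 1
--         return total
--
--     left, right = 1, N * N + 1
--     while left < right:
--         mid = (left + right) // 2
--         if count(mid) >= need:
--             right = mid
--         else: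
--             left = mid + 1
--     return -1 if left == N * N + 1 else left
-- ===== Notes on version B (the rewrite author's own statement) =====
-- stated objective: faster
-- what changed: B replaces A's O(N)-per-check sum of min(X//i, N) over every i by quotient-block (hyperbola) summation that handles each run of equal X//i at once (O(sqrt(X)) blocks per check), inside the same binary search.
import Mathlib
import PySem

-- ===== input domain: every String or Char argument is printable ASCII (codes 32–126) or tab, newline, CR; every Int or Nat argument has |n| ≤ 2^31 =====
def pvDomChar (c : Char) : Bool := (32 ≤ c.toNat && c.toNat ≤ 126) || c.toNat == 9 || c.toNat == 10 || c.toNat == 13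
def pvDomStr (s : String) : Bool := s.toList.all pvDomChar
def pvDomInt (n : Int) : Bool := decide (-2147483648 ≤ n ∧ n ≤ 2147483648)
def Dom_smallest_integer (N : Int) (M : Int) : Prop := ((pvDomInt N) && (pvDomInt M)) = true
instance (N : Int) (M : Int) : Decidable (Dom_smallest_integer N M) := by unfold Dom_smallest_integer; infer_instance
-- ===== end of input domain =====

-- B replaces A's O(N)-per-check pair count by O(√X) quotient-block summation inside the same binary search.

-- ===== PORT A =====
-- check(X, N, M): count = Σ_{i=1}^{N} min(X // i, N); return count >= M * 2
def pvCheckA (X : Int) (N : Int) (M : Int) : Bool :=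
  let count := (PySem.List.pyRange 1 (N + 1) 1).foldl
    (fun count i => count + min (PySem.Int.floordiv X i) N) 0
  decide (M * 2 ≤ count)

-- the 'while left < right' bisection loop of A
def pvLoopA (N : Int) (M : Int) (left : Int) (right : Int) : Int :=
  if _h : left < right then
    let mid := PySem.Int.floordiv (left + right) 2
    if pvCheckA mid N M then pvLoopA N M left mid
    else pvLoopA N M (mid + 1) right
  else left
termination_by (right - left).toNat
decreasing_by
  · have h2 : PySem.Int.floordiv (left + right) 2 < right := by
      rw [PySem.Int.floordiv_lt_iff_lt_mul (by norm_num)]; omega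
    omega
  · have h1 : left ≤ PySem.Int.floordiv (left + right) 2 := by
      rw [PySem.Int.le_floordiv_iff_mul_le (by norm_num)]; omega
    omega

def smallest_integer (N : Int) (M : Int) : Int :=
  let left := 1
  let right := N * N + 1
  let res := pvLoopA N M left right
  if res = N * N + 1 then -1 else res

-- ===== PORT B =====
-- the 'while i <= N' quotient-block loop of B's count(X)
-- (the two 'else total + …' branches are unreachable for X ≥ 1, 1 ≤ i — the Python loop
-- always advances there; they only make the recursion total)
def pvBlockB (X : Int) (N : Int) (total : Int) (i : Int) : Int :=
  if _h : i ≤ N then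
    if PySem.Int.floordiv X i = 0 then total
    else if N ≤ PySem.Int.floordiv X i then
      if h2 : i ≤ min (PySem.Int.floordiv X N) N then
        pvBlockB X N (total + N * (min (PySem.Int.floordiv X N) N - i + 1))
          (min (PySem.Int.floordiv X N) N + 1)
      else total + N * (min (PySem.Int.floordiv X N) N - i + 1)
    else
      if h2 : i ≤ min (PySem.Int.floordiv X (PySem.Int.floordiv X i)) N then
        pvBlockB X N
          (total + PySem.Int.floordiv X i *
            (min (PySem.Int.floordiv X (PySem.Int.floordiv X i)) N - i + 1))
          (min (PySem.Int.floordiv X (PySem.Int.floordiv X i)) N + 1)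
      else total + PySem.Int.floordiv X i *
        (min (PySem.Int.floordiv X (PySem.Int.floordiv X i)) N - i + 1)
  else total
termination_by (N + 1 - i).toNat
decreasing_by
  all_goals omega

-- B's count(X)
def pvCountB (N : Int) (X : Int) : Int := pvBlockB X N 0 1

-- B's bisection loop (tests 'count(mid) >= need' directly)
def pvLoopB (N : Int) (need : Int) (left : Int) (right : Int) : Int :=
  if _h : left < right then
    let mid := PySem.Int.floordiv (left + right) 2
    if need ≤ pvCountB N mid then pvLoopB N need left mid
    else pvLoopB N need (mid + 1) right
  else left
termination_by (right - left).toNat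
decreasing_by
  · have h2 : PySem.Int.floordiv (left + right) 2 < right := by
      rw [PySem.Int.floordiv_lt_iff_lt_mul (by norm_num)]; omega
    omega
  · have h1 : left ≤ PySem.Int.floordiv (left + right) 2 := by
      rw [PySem.Int.le_floordiv_iff_mul_le (by norm_num)]; omega
    omega

def smallest_integer_alt (N : Int) (M : Int) : Int :=
  let need := 2 * M
  let left := pvLoopB N need 1 (N * N + 1)
  if left = N * N + 1 then -1 else left

-- ===== PRECONDITION & SPEC =====
def Spec_smallest_integer (N : Int) (M : Int) (out : Int) : Prop := out = smallest_integer_alt N M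
instance (N : Int) (M : Int) (out : Int) : Decidable (Spec_smallest_integer N M out) := by unfold Spec_smallest_integer; infer_instance

-- ===== CLAIM (what is proved, stated in full; the proofs are below) =====
def Claim_equal_smallest_integer : Prop := ∀ (N : Int) (M : Int), Dom_smallest_integer N M → Spec_smallest_integer N M (smallest_integer N M)

-- ===== LEMMAS AND PROOFS =====

-- the block loop computes A's per-index sum over the remaining indices [i, N]
lemma pvBlockB_eq (X N : Int) (hX : 1 ≤ X) :
    ∀ (m : Nat) (i total : Int), (N + 1 - i).toNat ≤ m → 1 ≤ i →
      pvBlockB X N total i =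
        total + ((PySem.List.pyRange i (N + 1) 1).map
          (fun k => min (PySem.Int.floordiv X k) N)).sum := by
  intro m
  induction m with
  | zero =>
    intro i total hm hi
    have hiN : ¬ i ≤ N := by omega
    rw [pvBlockB]
    simp [hiN, PySem.List.pyRange_one_eq_nil (by omega : N + 1 ≤ i)]
  | succ m ih =>
    intro i total hm hi
    rw [pvBlockB]
    by_cases hiN : i ≤ N
    · simp only [hiN, dif_pos]
      have hi0 : (0:Int) < i := by omega
      by_cases hq0 : PySem.Int.floordiv X i = 0
      · -- X < i: every remaining term is 0
        have hXi : X < i := by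
          have := (PySem.Int.floordiv_eq_iff_of_pos hi0).mp hq0
          omega
        have hsum : ((PySem.List.pyRange i (N + 1) 1).map
            (fun k => min (PySem.Int.floordiv X k) N)).sum = 0 := by
          apply List.sum_eq_zero
          intro x hx
          simp only [List.mem_map] at hx
          obtain ⟨k, hk, rfl⟩ := hx
          rw [PySem.List.mem_pyRange_one] at hk
          have hfk : PySem.Int.floordiv X k = 0 := by
            rw [PySem.Int.floordiv_eq_iff_of_pos (by omega : (0:Int) < k)]
            omega
          rw [hfk]
          omega
        simp [hq0, hsum]
      · have hq1 : 1 ≤ PySem.Int.floordiv X i := by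
          have h0 : 0 ≤ PySem.Int.floordiv X i := by
            rw [PySem.Int.le_floordiv_iff_mul_le hi0]; omega
          omega
        have hbr : (PySem.Int.floordiv X i) * i ≤ X ∧ X < (PySem.Int.floordiv X i + 1) * i :=
          (PySem.Int.floordiv_eq_iff_of_pos hi0).mp rfl
        by_cases hNq : N ≤ PySem.Int.floordiv X i
        · -- saturated block: every k in [i, j] contributes N
          set j := min (PySem.Int.floordiv X N) N with hj
          have hN0 : (0:Int) < N := by omega
          have hij : i ≤ j := by
            have : i ≤ PySem.Int.floordiv X N := by
              rw [PySem.Int.le_floordiv_iff_mul_le hN0]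
              calc i * N ≤ (PySem.Int.floordiv X i) * i := by nlinarith
                _ ≤ X := hbr.1
            omega
          have hconst : ∀ k ∈ PySem.List.pyRange i (j + 1) 1,
              min (PySem.Int.floordiv X k) N = N := by
            intro k hk
            rw [PySem.List.mem_pyRange_one] at hk
            have : N ≤ PySem.Int.floordiv X k := by
              rw [PySem.Int.le_floordiv_iff_mul_le (by omega : (0:Int) < k)]
              have hkj : k ≤ PySem.Int.floordiv X N := by omega
              have := (PySem.Int.le_floordiv_iff_mul_le hN0).mp hkj
              nlinarith
            omega
          rw [PySem.List.pyRange_one_append i (j + 1) (N + 1) (by omega) (by omega),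
            List.map_append, List.sum_append]
          rw [List.map_congr_left hconst, PySem.List.sum_map_const_int,
            PySem.List.length_pyRange_one]
          rw [ih (j + 1) _ (by omega) (by omega)]
          simp only [hq0, hNq, if_pos, hij, dif_pos]
          push_cast [Int.toNat_of_nonneg (by omega : (0:Int) ≤ j + 1 - i)]
          ring
        · -- ordinary block: every k in [i, j] has X // k = q
          set q := PySem.Int.floordiv X i with hqdef
          set j := min (PySem.Int.floordiv X q) N with hj
          have hq0' : (0:Int) < q := hq1
          have hij : i ≤ j := by
            have : i ≤ PySem.Int.floordiv X q := by
              rw [PySem.Int.le_floordiv_iff_mul_le hq0']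
              calc i * q = q * i := by ring
                _ ≤ X := hbr.1
            omega
          have hconst : ∀ k ∈ PySem.List.pyRange i (j + 1) 1,
              min (PySem.Int.floordiv X k) N = q := by
            intro k hk
            rw [PySem.List.mem_pyRange_one] at hk
            have hfk : PySem.Int.floordiv X k = q := by
              rw [PySem.Int.floordiv_eq_iff_of_pos (by omega : (0:Int) < k)]
              constructor
              · have hkj : k ≤ PySem.Int.floordiv X q := by omega
                have := (PySem.Int.le_floordiv_iff_mul_le hq0').mp hkj
                nlinarith
              · calc X < (q + 1) * i := hbr.2
                  _ ≤ (q + 1) * k := by nlinarith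
            rw [hfk]; omega
          rw [PySem.List.pyRange_one_append i (j + 1) (N + 1) (by omega) (by omega),
            List.map_append, List.sum_append]
          rw [List.map_congr_left hconst, PySem.List.sum_map_const_int,
            PySem.List.length_pyRange_one]
          rw [ih (j + 1) _ (by omega) (by omega)]
          simp only [hq0, hNq, hij, dif_pos]
          push_cast [Int.toNat_of_nonneg (by omega : (0:Int) ≤ j + 1 - i)]
          ring
    · simp [hiN, PySem.List.pyRange_one_eq_nil (by omega : N + 1 ≤ i)]

-- B's count equals A's per-index sum, hence the two loop tests agree (X ≥ 1)
lemma check_eq (X N M : Int) (hX : 1 ≤ X) :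
    pvCheckA X N M = decide (2 * M ≤ pvCountB N X) := by
  rw [pvCheckA, pvCountB,
    pvBlockB_eq X N hX (N + 1 - 1).toNat 1 0 (by omega) (by omega),
    PySem.List.foldl_add]
  simp only [zero_add]
  rw [decide_eq_decide]
  omega

-- the two bisection loops agree whenever 1 ≤ left (so every probed mid is ≥ 1)
lemma loop_eq (N M : Int) :
    ∀ (m : Nat) (l r : Int), (r - l).toNat ≤ m → 1 ≤ l →
      pvLoopA N M l r = pvLoopB N (2 * M) l r := by
  intro m
  induction m with
  | zero =>
    intro l r hm hl
    have hlr : ¬ l < r := by omega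
    rw [pvLoopA, pvLoopB]
    simp [hlr]
  | succ m ih =>
    intro l r hm hl
    rw [pvLoopA, pvLoopB]
    by_cases hlr : l < r
    · simp only [hlr, dif_pos]
      have h1 : l ≤ PySem.Int.floordiv (l + r) 2 := by
        rw [PySem.Int.le_floordiv_iff_mul_le (by norm_num)]; omega
      have h2 : PySem.Int.floordiv (l + r) 2 < r := by
        rw [PySem.Int.floordiv_lt_iff_lt_mul (by norm_num)]; omega
      rw [check_eq _ _ _ (by omega)]
      by_cases hc : 2 * M ≤ pvCountB N (PySem.Int.floordiv (l + r) 2)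
      · simp only [hc, decide_true, if_pos]
        exact ih l _ (by omega) hl
      · simp only [hc, decide_false, if_neg, Bool.false_eq_true, not_false_iff]
        exact ih _ r (by omega) (by omega)
    · simp [hlr]

-- ===== VERDICT (by name: the statement is the Claim_ definition above) =====
theorem smallest_integer_spec : Claim_equal_smallest_integer := by
  intro N M _
  unfold Spec_smallest_integer smallest_integer smallest_integer_alt
  simp only []
  rw [loop_eq N M (N * N + 1 - 1).toNat 1 (N * N + 1) (by omega) (by omega)]
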